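-- pv_equiv track=rewrite | github.com/ArchanaV01/code_metry | 06-get_kth_digit-Python/get_kth_digit.py | fun_get_kth_digit
-- ===== SOURCE A (Python) =====
-- def fun_get_kth_digit(digit, k):
--     counter = 0
--     if (digit < 0):
--         digit *= -1
--     while (digit > 0):
--         if counter == k:
--             return digit % 10
--         digit //= 10
--         counter += 1
--     return 0
-- ===== SOURCE B (Python) =====
-- def fun_get_kth_digit(digit, k):
--     n = abs(digit)
--     if k < 0 or k >= n.bit_length():
--         return 0
--     return (n // 10 ** k) % 10
-- ===== Notes on version B (the rewrite author's own statement) =====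
-- stated objective: simpler
-- what changed: Replaces A's digit-stripping while-loop with the closed form (abs(digit) // 10**k) % 10, returning 0 outright when k is negative or at least abs(digit).bit_length() (then 10**k > abs(digit) and the digit is 0, without building a huge power).
import Mathlib
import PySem

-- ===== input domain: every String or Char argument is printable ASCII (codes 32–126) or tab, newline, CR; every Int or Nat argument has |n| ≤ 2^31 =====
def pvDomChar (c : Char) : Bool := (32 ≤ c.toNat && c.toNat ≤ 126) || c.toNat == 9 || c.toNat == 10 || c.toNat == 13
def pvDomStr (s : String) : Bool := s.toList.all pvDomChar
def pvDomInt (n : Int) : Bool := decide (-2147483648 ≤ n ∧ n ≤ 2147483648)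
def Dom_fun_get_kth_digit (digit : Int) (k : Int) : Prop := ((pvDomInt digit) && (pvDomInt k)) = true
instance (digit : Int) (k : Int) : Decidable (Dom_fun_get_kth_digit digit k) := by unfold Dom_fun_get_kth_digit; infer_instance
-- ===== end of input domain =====

-- B replaces A's digit-stripping while-loop by the closed form (abs(digit) // 10**k) % 10 (0 for k < 0): simpler.

-- ===== PORT A =====
-- the while-loop of A: state (digit, counter), k fixed
def pvLoopA (digit : Int) (counter : Int) (k : Int) : Int :=
  if _h : digit > 0 then
    if counter == k then PySem.Int.mod digit 10
    else pvLoopA (PySem.Int.floordiv digit 10) (counter + 1) k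
  else 0
termination_by digit.toNat
decreasing_by
  simp only [PySem.Int.floordiv_eq_ediv_of_pos (a := digit) (by omega : (0:Int) < 10)]
  omega

def fun_get_kth_digit (digit : Int) (k : Int) : Int :=
  let digit := if digit < 0 then digit * (-1) else digit
  pvLoopA digit 0 k

-- ===== PORT B =====
def fun_get_kth_digit_alt (digit : Int) (k : Int) : Int :=
  let n : Int := |digit|
  if k < 0 ∨ (Nat.size n.natAbs : Int) ≤ k then 0
  else PySem.Int.mod (PySem.Int.floordiv n ((10 : Int) ^ k.toNat)) 10

-- ===== PRECONDITION & SPEC =====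
def Spec_fun_get_kth_digit (digit : Int) (k : Int) (out : Int) : Prop := out = fun_get_kth_digit_alt digit k
instance (digit : Int) (k : Int) (out : Int) : Decidable (Spec_fun_get_kth_digit digit k out) := by unfold Spec_fun_get_kth_digit; infer_instance

-- ===== CLAIM (what is proved, stated in full; the proofs are below) =====
def Claim_equal_fun_get_kth_digit : Prop := ∀ (digit : Int) (k : Int), Dom_fun_get_kth_digit digit k → Spec_fun_get_kth_digit digit k (fun_get_kth_digit digit k)

-- ===== LEMMAS AND PROOFS =====

-- when the counter has already passed k, the loop can never return a digit
lemma pvLoopA_of_lt (d c k : Int) (hck : k < c) : pvLoopA d c k = 0 := by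
  by_cases hd : d > 0
  · rw [pvLoopA, dif_pos hd]
    have hne : (c == k) = false := by simp; omega
    rw [hne]
    simp only [Bool.false_eq_true, if_false]
    exact pvLoopA_of_lt _ (c + 1) k (by omega)
  · rw [pvLoopA]; simp [hd]
termination_by d.toNat
decreasing_by
  simp only [PySem.Int.floordiv_eq_ediv_of_pos (a := d) (by omega : (0:Int) < 10)]
  omega

-- the loop computes the closed form when the counter has not yet passed k
lemma pvLoopA_closed (d c k : Int) (hd : 0 ≤ d) (hck : c ≤ k) :
    pvLoopA d c k = (d / (10 : Int) ^ (k - c).toNat) % 10 := by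
  by_cases hpos : d > 0
  · rw [pvLoopA, dif_pos hpos]
    by_cases hek : c = k
    · subst hek
      simp only [beq_self_eq_true, if_pos, sub_self, Int.toNat_zero, pow_zero, Int.ediv_one]
      exact PySem.Int.mod_eq_emod_of_pos (by omega)
    · have hne : (c == k) = false := by simp [hek]
      rw [hne]
      simp only [Bool.false_eq_true, if_false]
      rw [PySem.Int.floordiv_eq_ediv_of_pos (by omega : (0:Int) < 10)]
      rw [pvLoopA_closed (d / 10) (c + 1) k (by positivity) (by omega)]
      congr 1
      have h10 : (k - c).toNat = (k - (c + 1)).toNat + 1 := by omega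
      rw [h10, pow_succ]
      rw [Int.ediv_ediv_of_nonneg (by omega : (0:Int) ≤ 10)]
      ring_nf
  · have hz : d = 0 := by omega
    subst hz
    rw [pvLoopA]
    simp
termination_by d.toNat
decreasing_by omega

-- ===== VERDICT (by name: the statement is the Claim_ definition above) =====
theorem fun_get_kth_digit_spec : Claim_equal_fun_get_kth_digit := by
  intro digit k _
  unfold Spec_fun_get_kth_digit fun_get_kth_digit fun_get_kth_digit_alt
  have habs : (if digit < 0 then digit * (-1) else digit) = |digit| := by
    by_cases h : digit < 0
    · rw [if_pos h, abs_of_neg h]; ring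
    · rw [if_neg h, abs_of_nonneg (by omega : (0:Int) ≤ digit)]
  simp only [habs]
  by_cases hk : k < 0
  · rw [if_pos (Or.inl hk)]
    exact pvLoopA_of_lt _ 0 k hk
  · rw [pvLoopA_closed |digit| 0 k (abs_nonneg _) (by omega)]
    have h0 : (k - 0).toNat = k.toNat := by omega
    rw [h0]
    by_cases hsz : (Nat.size (|digit|).natAbs : Int) ≤ k
    · rw [if_pos (Or.inr hsz)]
      have hlt : |digit| < (10 : Int) ^ k.toNat := by
        have h1 : (|digit|).natAbs < 2 ^ Nat.size (|digit|).natAbs := Nat.lt_size_self _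
        have h2 : (2:Nat) ^ Nat.size (|digit|).natAbs ≤ 2 ^ k.toNat :=
          Nat.pow_le_pow_right (by omega) (by omega)
        have h3 : (2:Nat) ^ k.toNat ≤ 10 ^ k.toNat :=
          Nat.pow_le_pow_left (by omega) _
        have h4 : (|digit|).natAbs < 10 ^ k.toNat := by omega
        have h5 : |digit| = ((|digit|).natAbs : Int) := by
          rw [Int.natAbs_abs, Int.abs_eq_natAbs]
        rw [h5]
        exact_mod_cast h4
      rw [Int.ediv_eq_zero_of_lt (abs_nonneg _) hlt]
      norm_num
    · rw [if_neg (by push_neg; exact ⟨by omega, by omega⟩)]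
      rw [PySem.Int.floordiv_eq_ediv_of_pos (by positivity), PySem.Int.mod_eq_emod_of_pos (by omega)]
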